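-- pv_equiv track=rewrite | github.com/ProjectSeventy/TildeSummariser | TildeSummariser/utils/topic_ident_utils.py | score_keywords
-- ===== SOURCE A (Python) =====
-- def score_keywords(member_words, word_scores, candidates, appearances):
--
--     candidates_no_duplication = [] #List of each unique candidate keyword
--     keyword_scores = [] #Score for each candidate keyword
--     candidate_appearances = [] #Indices of where each keyword appears
--
--     #For each candidate keyword, add the scores for it's member words, and if it's not already in candidatesNoDuplication, add it, it's score, and it's appearances, otherwise, just add appearance
--     for i in range(0, len(candidates)):
--
--         #Calculate score
--         score = 0
--         for word in candidates[i]: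
--             j = member_words.index(word)
--             score += word_scores[j]
--
--         if not candidates[i] in candidates_no_duplication:
--             candidates_no_duplication.append(candidates[i])
--             keyword_scores.append(score)
--             candidate_appearances.append([appearances[i]])
--
--         else:
--             ind = candidates_no_duplication.index(candidates[i])
--             candidate_appearances[ind].append(appearances[i])
--
--     return candidates_no_duplication, keyword_scores, candidate_appearances
-- ===== SOURCE B (Python) =====
-- def score_keywords(member_words, word_scores, candidates, appearances):
--     # Extraction algorithm: repeatedly take the first remaining (candidate, appearance)
--     # pair, emit that candidate with its score and ALL its appearances gathered from the
--     # remaining pairs, then continue on the pairs with every occurrence of it removed.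
--     pairs = list(zip(candidates, appearances))
--     out_cands, out_scores, out_apps = [], [], []
--     while pairs:
--         c = pairs[0][0]
--         out_cands.append(c)
--         out_scores.append(sum(word_scores[member_words.index(w)] for w in c))
--         out_apps.append([a for d, a in pairs if d == c])
--         pairs = [(d, a) for d, a in pairs if d != c]
--     return out_cands, out_scores, out_apps
-- ===== Notes on version B (the rewrite author's own statement) =====
-- stated objective: alternative
-- what changed: B replaces A's incremental dedup (one pass appending to growing output lists, with membership tests and .index scans of the partial dedup list and in-place appearance appends) by an extraction algorithm: it repeatedly pulls the first remaining candidate, gathers all of its appearances from the whole remaining pair list in one sweep, and removes every occurrence of it before continuing, so no partial-output list is ever searched or mutated.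
import Mathlib
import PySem

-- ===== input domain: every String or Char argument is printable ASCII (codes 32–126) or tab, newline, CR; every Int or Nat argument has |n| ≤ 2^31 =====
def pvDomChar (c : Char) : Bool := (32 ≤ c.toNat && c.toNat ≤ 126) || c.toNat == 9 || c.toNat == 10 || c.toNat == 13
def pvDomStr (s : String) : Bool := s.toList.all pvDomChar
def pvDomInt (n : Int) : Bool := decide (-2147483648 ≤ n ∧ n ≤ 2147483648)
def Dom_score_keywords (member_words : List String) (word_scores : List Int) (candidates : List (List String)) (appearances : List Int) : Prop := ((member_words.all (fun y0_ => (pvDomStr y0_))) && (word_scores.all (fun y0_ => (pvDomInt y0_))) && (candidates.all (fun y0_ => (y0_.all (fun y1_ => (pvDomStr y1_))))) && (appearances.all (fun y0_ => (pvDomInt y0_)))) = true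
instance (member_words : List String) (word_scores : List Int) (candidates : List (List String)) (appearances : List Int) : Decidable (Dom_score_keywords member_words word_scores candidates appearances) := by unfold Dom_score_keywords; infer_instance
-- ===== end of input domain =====

-- B replaces A's incremental dedup loop (membership/.index scans of the growing output list, in-place
-- appends) by an extraction algorithm: take the first remaining pair, gather ALL appearances of that
-- candidate from the remaining pairs in one sweep, remove every occurrence of it, and continue.
-- Equivalence of the RETURN value is proved on Pre_ (the inputs where the Python A raises no exception).

-- ===== PORT A =====
-- inner loop 'for word in candidates[i]: j = member_words.index(word); score += word_scores[j]'
-- (none = ValueError from .index or IndexError from word_scores[j])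
def pvAScore (member_words : List String) (word_scores : List Int) (cand : List String) : Option Int :=
  cand.foldl (fun acc word =>
    acc.bind fun score =>
      (PySem.List.index? member_words word).bind fun j =>
        (PySem.List.pyGet? word_scores (j : Int)).map fun v => score + v) (some 0)

-- the if/else body of A's main loop (the 'none' arm of the match is unreachable: membership was just tested)
def pvAStep (st : List (List String) × List Int × List (List Int)) (c : List String) (s : Int) (a : Int) :
    List (List String) × List Int × List (List Int) :=
  if ¬ st.1.contains c then (st.1 ++ [c], st.2.1 ++ [s], st.2.2 ++ [[a]])
  else match PySem.List.index? st.1 c with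
    | some ind => (st.1, st.2.1, st.2.2.modify ind (· ++ [a]))
    | none => st

-- 'for i in range(0, len(candidates))'; appearances[i] is read once here though Python reads it inside either
-- branch — both branches read it, so the option result is identical on every input.
def score_keywords (member_words : List String) (word_scores : List Int) (candidates : List (List String)) (appearances : List Int) : List (List String) × List Int × List (List Int) :=
  ((PySem.List.pyRange 0 (candidates.length : Int)).foldl (fun acc i =>
      acc.bind fun st =>
        (PySem.List.pyGet? candidates i).bind fun c =>
          (pvAScore member_words word_scores c).bind fun s =>
            (PySem.List.pyGet? appearances i).map fun a => pvAStep st c s a)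
    (some ([], [], []))).getD ([], [], [])

-- ===== PORT B =====
-- 'sum(word_scores[member_words.index(w)] for w in c)'
def pvBScore (member_words : List String) (word_scores : List Int) (c : List String) : Option Int :=
  (c.mapM fun w => (PySem.List.index? member_words w).bind fun j =>
      PySem.List.pyGet? word_scores (j : Int)).map List.sum

-- Source B's while loop: each round consumes pairs[0] and every later pair with the same candidate,
-- so the pair list strictly shrinks (termination); the three output lists are built front-to-back.
def pvBGo (mw : List String) (ws : List Int) :
    List (List String × Int) → Option (List (List String) × List Int × List (List Int))
  | [] => some ([], [], [])
  | (c, a) :: rest =>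
    (pvBScore mw ws c).bind fun s =>
      (pvBGo mw ws (rest.filter fun p => !(p.1 == c))).map fun t =>
        (c :: t.1, s :: t.2.1, (a :: ((rest.filter fun p => p.1 == c).map (·.2))) :: t.2.2)
  termination_by l => l.length
  decreasing_by
    simp only [List.length_cons, List.length_unattach]
    exact Nat.lt_succ_of_le (le_trans (List.length_filter_le _ _) (by simp))

def score_keywords_alt (member_words : List String) (word_scores : List Int) (candidates : List (List String)) (appearances : List Int) : List (List String) × List Int × List (List Int) :=
  (pvBGo member_words word_scores (candidates.zip appearances)).getD ([], [], [])

-- ===== PRECONDITION & SPEC =====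
-- Pre_ = exactly the inputs where the Python A returns: every candidate word occurs in member_words with its
-- first index inside word_scores (else ValueError/IndexError), and appearances covers candidates (else IndexError).
def Pre_score_keywords (member_words : List String) (word_scores : List Int) (candidates : List (List String)) (appearances : List Int) : Prop :=
  candidates.length ≤ appearances.length ∧
  ∀ c ∈ candidates, ∀ w ∈ c, w ∈ member_words ∧ member_words.idxOf w < word_scores.length
instance (member_words : List String) (word_scores : List Int) (candidates : List (List String)) (appearances : List Int) : Decidable (Pre_score_keywords member_words word_scores candidates appearances) := by unfold Pre_score_keywords; infer_instance

def pvWitness_score_keywords : List String × List Int × List (List String) × List Int :=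
  (["a", "b"], [3, -1], [["a"], ["b", "a"], ["a"]], [0, 1, 2])

def Spec_score_keywords (member_words : List String) (word_scores : List Int) (candidates : List (List String)) (appearances : List Int) (out : List (List String) × List Int × List (List Int)) : Prop := out = score_keywords_alt member_words word_scores candidates appearances
instance (member_words : List String) (word_scores : List Int) (candidates : List (List String)) (appearances : List Int) (out : List (List String) × List Int × List (List Int)) : Decidable (Spec_score_keywords member_words word_scores candidates appearances out) := by unfold Spec_score_keywords; infer_instance

-- ===== CLAIM (what is proved, stated in full; the proofs are below) =====
def Claim_equal_score_keywords : Prop := ∀ (member_words : List String) (word_scores : List Int) (candidates : List (List String)) (appearances : List Int), Dom_score_keywords member_words word_scores candidates appearances → Pre_score_keywords member_words word_scores candidates appearances → Spec_score_keywords member_words word_scores candidates appearances (score_keywords member_words word_scores candidates appearances)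

-- ===== LEMMAS AND PROOFS =====

-- the common value of both score computations on a good candidate
def pvScoreV (member_words : List String) (word_scores : List Int) (c : List String) : Int :=
  (c.map fun w => word_scores.getD (member_words.idxOf w) 0).sum

-- a good word: index? finds it and word_scores has that index
lemma pv_index_get (mw : List String) (ws : List Int) (w : String) (h1 : w ∈ mw) (h2 : mw.idxOf w < ws.length) :
    ((PySem.List.index? mw w).bind fun j => PySem.List.pyGet? ws (j : Int)) = some (ws.getD (mw.idxOf w) 0) := by
  have hidx : List.idxOf? w mw = some (List.idxOf w mw) := by
    rw [List.idxOf?_eq_some_iff]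
    refine ⟨List.idxOf_lt_length_of_mem h1, List.getElem_idxOf _, ?_⟩
    intro j hj
    simpa using List.not_of_lt_findIdx (p := fun x => x == w) (xs := mw) hj
  rw [PySem.List.index?_eq_idxOf?, hidx]
  simp [PySem.List.pyGet?_natCast, List.getElem?_eq_getElem h2]

lemma pvAScore_eq (mw : List String) (ws : List Int) (c : List String)
    (h : ∀ w ∈ c, w ∈ mw ∧ mw.idxOf w < ws.length) :
    pvAScore mw ws c = some (pvScoreV mw ws c) := by
  have aux : ∀ (c : List String), (∀ w ∈ c, w ∈ mw ∧ mw.idxOf w < ws.length) → ∀ s : Int,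
      c.foldl (fun acc word =>
        acc.bind fun score =>
          (PySem.List.index? mw word).bind fun j =>
            (PySem.List.pyGet? ws (j : Int)).map fun v => score + v) (some s)
      = some (s + pvScoreV mw ws c) := by
    intro c
    induction c with
    | nil => intro _ s; simp [pvScoreV]
    | cons w c ih =>
      intro h s
      have hw := h w (by simp)
      have key := pv_index_get mw ws w hw.1 hw.2
      cases hI : PySem.List.index? mw w with
      | none => rw [hI] at key; simp at key
      | some j =>
        rw [hI] at key; simp only [Option.bind_some] at key
        simp only [List.foldl_cons, Option.bind_some, hI, key, Option.map_some]
        rw [ih (fun w hw => h w (by simp [hw])) _]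
        simp [pvScoreV]
        ring
  unfold pvAScore
  simpa using aux c h 0

lemma pvBScore_eq (mw : List String) (ws : List Int) (c : List String)
    (h : ∀ w ∈ c, w ∈ mw ∧ mw.idxOf w < ws.length) :
    pvBScore mw ws c = some (pvScoreV mw ws c) := by
  have aux : ∀ (c : List String), (∀ w ∈ c, w ∈ mw ∧ mw.idxOf w < ws.length) →
      (c.mapM fun w => (PySem.List.index? mw w).bind fun j => PySem.List.pyGet? ws (j : Int))
        = some (c.map fun w => ws.getD (mw.idxOf w) 0) := by
    intro c
    induction c with
    | nil => intro _; rfl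
    | cons w c ih =>
      intro h
      have hw := h w (by simp)
      have key := pv_index_get mw ws w hw.1 hw.2
      simp only [List.mapM_cons, key, ih (fun w hw => h w (by simp [hw]))]
      rfl
  unfold pvBScore
  rw [aux c h]
  rfl

-- A's range-indexed loop is the fold over zip(candidates, appearances) when appearances is long enough
lemma pvA_fold_eq_zip (mw : List String) (ws : List Int) :
    ∀ (cs : List (List String)) (as_ : List Int), cs.length ≤ as_.length →
    ∀ (st : Option (List (List String) × List Int × List (List Int))),
    (PySem.List.pyRange 0 (cs.length : Int)).foldl (fun acc i =>
        acc.bind fun st =>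
          (PySem.List.pyGet? cs i).bind fun c =>
            (pvAScore mw ws c).bind fun s =>
              (PySem.List.pyGet? as_ i).map fun a => pvAStep st c s a) st
      = (cs.zip as_).foldl (fun acc p =>
          acc.bind fun st => (pvAScore mw ws p.1).bind fun s => some (pvAStep st p.1 s p.2)) st := by
  have aux : ∀ (cs : List (List String)) (as_ : List Int), cs.length ≤ as_.length →
      ∀ (st : Option (List (List String) × List Int × List (List Int))),
      (List.range cs.length).foldl (fun acc k =>
          acc.bind fun st =>
            cs[k]?.bind fun c =>
              (pvAScore mw ws c).bind fun s =>
                as_[k]?.map fun a => pvAStep st c s a) st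
        = (cs.zip as_).foldl (fun acc p =>
            acc.bind fun st => (pvAScore mw ws p.1).bind fun s => some (pvAStep st p.1 s p.2)) st := by
    intro cs
    induction cs with
    | nil => intro as_ _ st; simp
    | cons c cs ih =>
      intro as_ hlen st
      cases as_ with
      | nil => simp at hlen
      | cons a as_ =>
        rw [List.length_cons, List.range_succ_eq_map, List.foldl_cons, List.foldl_map]
        simp only [List.getElem?_cons_succ, List.getElem?_cons_zero, Option.bind_some,
          List.zip_cons_cons, List.foldl_cons]
        rw [ih as_ (by simpa using hlen)]
        rcases st with _ | st
        · rfl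
        · simp only [Option.bind_some]
          cases pvAScore mw ws c with
          | none => rfl
          | some s => simp
  intro cs as_ hlen st
  rw [PySem.List.pyRange_zero_natCast, List.foldl_map]
  simp only [PySem.List.pyGet?_natCast]
  exact aux cs as_ hlen st

-- first-seen unique candidates of the processed pairs
def pvD (l : List (List String × Int)) : List (List String) := PySem.Set.ofList (l.map (·.1))

-- appearance indices collected for one unique candidate
def pvApps (l : List (List String × Int)) (c : List String) : List Int :=
  (l.filter fun p => p.1 == c).map (·.2)

lemma pv_map_modify {α β : Type} [BEq α] [LawfulBEq α] [DecidableEq α] (D : List α) (f : α → β) (g : β → β) (c : α)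
    (hc : c ∈ D) (hnd : D.Nodup) :
    (D.map f).modify (D.idxOf c) g = D.map fun x => if x = c then g (f x) else f x := by
  induction D with
  | nil => cases hc
  | cons d D ih =>
    rcases List.nodup_cons.1 hnd with ⟨hd, hnd'⟩
    by_cases hdc : d = c
    · subst hdc
      rw [List.idxOf_cons_self]
      simp only [List.map_cons, List.modify_zero_cons]
      congr 1
      exact (List.map_congr_left fun x hx => by
        rw [if_neg]; rintro rfl; exact hd hx).symm
    · have hc' : c ∈ D := by
        rcases List.mem_cons.1 hc with h | h
        · exact absurd h.symm hdc
        · exact h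
      rw [List.idxOf_cons_ne _ (by simpa using hdc)]
      rw [List.map_cons, List.map_cons, List.modify_cons]
      rw [if_neg (by omega), Nat.succ_sub_one, ih hc' hnd', if_neg hdc]

-- the invariant of A's deduplicating loop
lemma pv_zip_fold_char (mw : List String) (ws : List Int) (l : List (List String × Int))
    (H : ∀ p ∈ l, pvAScore mw ws p.1 = some (pvScoreV mw ws p.1)) :
    l.foldl (fun acc p =>
        acc.bind fun st => (pvAScore mw ws p.1).bind fun s => some (pvAStep st p.1 s p.2))
      (some ([], [], []))
    = some (pvD l, (pvD l).map (pvScoreV mw ws), (pvD l).map (pvApps l)) := by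
  induction l using List.reverseRecOn with
  | nil => simp [pvD, PySem.Set.ofList]
  | append_singleton l p ih =>
    have H' : ∀ q ∈ l, pvAScore mw ws q.1 = some (pvScoreV mw ws q.1) :=
      fun q hq => H q (List.mem_append_left _ hq)
    have Hp : pvAScore mw ws p.1 = some (pvScoreV mw ws p.1) := H p (by simp)
    rw [List.foldl_append, ih H', List.foldl_cons, List.foldl_nil, Option.bind_some, Hp,
      Option.bind_some]
    have hDfst : ∀ x, x ∈ pvD l ↔ x ∈ l.map (·.1) := fun x => PySem.Set.mem_ofList _ _
    have hDappend : pvD (l ++ [p]) = PySem.Set.add (pvD l) p.1 := by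
      simp [pvD, PySem.Set.ofList_eq_foldl, List.foldl_append]
    have happs_ne : ∀ x, x ≠ p.1 → pvApps (l ++ [p]) x = pvApps l x := by
      intro x hx
      have hb : (p.1 == x) = false := beq_eq_false_iff_ne.2 fun h => hx h.symm
      simp [pvApps, List.filter_append, hb]
    have happs_self : pvApps (l ++ [p]) p.1 = pvApps l p.1 ++ [p.2] := by
      simp [pvApps, List.filter_append]
    by_cases hmem : p.1 ∈ pvD l
    · have hcont : (pvD l).contains p.1 = true := by
        simpa [List.contains_iff_mem] using hmem
      have hidx : PySem.List.index? (pvD l) p.1 = some ((pvD l).idxOf p.1) := by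
        rw [PySem.List.index?_eq_idxOf?, List.idxOf?_eq_some_iff]
        refine ⟨List.idxOf_lt_length_of_mem hmem, List.getElem_idxOf _, ?_⟩
        intro j hj
        simpa using List.not_of_lt_findIdx (p := fun x => x == p.1) (xs := pvD l) hj
      have hD : pvD (l ++ [p]) = pvD l := by
        rw [hDappend, PySem.Set.add, if_pos (show PySem.Set.contains (pvD l) p.1 = true by
          simp [PySem.Set.contains]; exact hmem)]
      simp only [pvAStep, hcont, not_true_eq_false, if_false, hidx]
      rw [pv_map_modify _ _ _ _ hmem (PySem.Set.nodup_ofList _), hD]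
      refine congrArg some (Prod.ext rfl (Prod.ext rfl ?_))
      refine List.map_congr_left fun x hx => ?_
      by_cases hxp : x = p.1
      · subst hxp; rw [if_pos rfl, happs_self]
      · rw [if_neg hxp, happs_ne x hxp]
    · have hcont : (pvD l).contains p.1 = false := by
        simpa [List.contains_iff_mem] using hmem
      have hD : pvD (l ++ [p]) = pvD l ++ [p.1] := by
        rw [hDappend, PySem.Set.add, if_neg (show ¬ PySem.Set.contains (pvD l) p.1 = true by
          simp [PySem.Set.contains]; exact hmem)]
      have happs_nil : pvApps l p.1 = [] := by
        rw [pvApps, List.filter_eq_nil_iff.2, List.map_nil]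
        intro q hq
        simp only [beq_iff_eq]
        intro hq1
        exact hmem ((hDfst p.1).2 (hq1 ▸ List.mem_map_of_mem hq))
      simp only [pvAStep, hcont, Bool.false_eq_true, not_false_eq_true, if_true]
      rw [hD]
      refine congrArg some (Prod.ext rfl (Prod.ext ?_ ?_))
      · show List.map (pvScoreV mw ws) (pvD l) ++ [pvScoreV mw ws p.1]
          = List.map (pvScoreV mw ws) (pvD l ++ [p.1])
        simp
      · show List.map (pvApps l) (pvD l) ++ [[p.2]]
          = List.map (pvApps (l ++ [p])) (pvD l ++ [p.1])
        rw [List.map_append, List.map_cons, List.map_nil, happs_self, happs_nil, List.nil_append]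
        congr 1
        refine List.map_congr_left fun x hx => (happs_ne x ?_).symm
        rintro rfl
        exact hmem hx

-- set(xs) commutes with filtering (first-occurrence dedup and filter are independent)
lemma pv_ofList_filter {α : Type} [BEq α] [LawfulBEq α] (p : α → Bool) (ys : List α) :
    PySem.Set.ofList (ys.filter p) = (PySem.Set.ofList ys).filter p := by
  induction ys using List.reverseRecOn with
  | nil => rfl
  | append_singleton ys x ih =>
    by_cases hp : p x
    · simp only [List.filter_append, List.filter_singleton, hp, cond_true]
      rw [PySem.Set.ofList_append_singleton, PySem.Set.ofList_append_singleton, ih,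
        PySem.Set.add, PySem.Set.add]
      split_ifs with h1 h2 h2
      · rfl
      · exact absurd (PySem.Set.contains_iff _ _ |>.2
          (List.mem_of_mem_filter (PySem.Set.contains_iff _ _ |>.1 h1))) h2
      · exact absurd (PySem.Set.contains_iff _ _ |>.2
          (List.mem_filter.2 ⟨PySem.Set.contains_iff _ _ |>.1 h2, hp⟩)) h1
      · rw [List.filter_append, List.filter_singleton]
        simp [hp]
    · simp only [List.filter_append, List.filter_singleton, hp, cond_false, List.append_nil]
      rw [ih, PySem.Set.ofList_append_singleton, PySem.Set.add]
      split_ifs with h2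
      · rfl
      · rw [List.filter_append, List.filter_singleton]
        simp [hp]

-- extracting the head candidate: the dedup list is the head followed by the dedup of the filtered rest
lemma pvD_cons (c : List String) (a : Int) (rest : List (List String × Int)) :
    pvD ((c, a) :: rest) = c :: pvD (rest.filter fun p => !(p.1 == c)) := by
  unfold pvD
  rw [List.map_cons, PySem.Set.ofList_cons]
  congr 1
  have h : ((rest.filter fun p => !(p.1 == c)).map (·.1))
      = ((rest.map (·.1)).filter fun x => !(x == c)) := by
    rw [List.filter_map]
    rfl
  rw [h, pv_ofList_filter]
  rfl

-- the two unfolding equations of pvBGo (a well-founded definition)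
lemma pvBGo_nil (mw : List String) (ws : List Int) : pvBGo mw ws [] = some ([], [], []) := by
  rw [pvBGo.eq_def]

lemma pvBGo_cons (mw : List String) (ws : List Int) (c : List String) (a : Int)
    (rest : List (List String × Int)) :
    pvBGo mw ws ((c, a) :: rest) =
      (pvBScore mw ws c).bind fun s =>
        (pvBGo mw ws (rest.filter fun p => !(p.1 == c))).map fun t =>
          (c :: t.1, s :: t.2.1, (a :: ((rest.filter fun p => p.1 == c).map (·.2))) :: t.2.2) := by
  rw [pvBGo.eq_def]

-- Source B's loop computes the same (dedup, scores, grouped appearances) triple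
lemma pvBGo_char (mw : List String) (ws : List Int) :
    ∀ (n : Nat) (l : List (List String × Int)), l.length ≤ n →
    (∀ p ∈ l, ∀ w ∈ p.1, w ∈ mw ∧ mw.idxOf w < ws.length) →
    pvBGo mw ws l = some (pvD l, (pvD l).map (pvScoreV mw ws), (pvD l).map (pvApps l)) := by
  intro n
  induction n with
  | zero =>
    intro l hl _
    rw [List.length_eq_zero_iff.1 (Nat.le_zero.1 hl), pvBGo_nil]
    simp [pvD, PySem.Set.ofList]
  | succ n ih =>
    intro l hl hgood
    match l with
    | [] =>
      rw [pvBGo_nil]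
      simp [pvD, PySem.Set.ofList]
    | (c, a) :: rest =>
      have hc : pvBScore mw ws c = some (pvScoreV mw ws c) :=
        pvBScore_eq mw ws c (hgood (c, a) (by simp))
      have hlen : (rest.filter fun p => !(p.1 == c)).length ≤ n :=
        le_trans (List.length_filter_le _ _) (by simpa using hl)
      have hg' : ∀ p ∈ rest.filter fun p => !(p.1 == c), ∀ w ∈ p.1, w ∈ mw ∧ mw.idxOf w < ws.length :=
        fun p hp => hgood p (List.mem_cons_of_mem _ (List.mem_of_mem_filter hp))
      rw [pvBGo_cons, hc, Option.bind_some, ih _ hlen hg', Option.map_some]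
      have hne : ∀ x ∈ pvD (rest.filter fun p => !(p.1 == c)), x ≠ c := by
        intro x hx
        have hx' := (PySem.Set.mem_ofList _ _).1 hx
        obtain ⟨p, hp, hpx⟩ := List.mem_map.1 hx'
        have hf := List.of_mem_filter hp
        simp only [Bool.not_eq_eq_eq_not, Bool.not_true, beq_eq_false_iff_ne] at hf
        exact hpx ▸ hf
      have happs_ne : ∀ x, x ≠ c →
          pvApps (rest.filter fun p => !(p.1 == c)) x = pvApps ((c, a) :: rest) x := by
        intro x hx
        unfold pvApps
        rw [List.filter_cons, if_neg (by simp only [beq_iff_eq]; intro h; exact hx h.symm)]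
        congr 1
        rw [List.filter_filter]
        refine List.filter_congr fun p _ => ?_
        by_cases hpx : p.1 = x
        · simp only [hpx, beq_self_eq_true]
          simpa using hx
        · simp [hpx]
      have happs_c : pvApps ((c, a) :: rest) c = a :: (rest.filter fun p => p.1 == c).map (·.2) := by
        unfold pvApps
        rw [List.filter_cons, if_pos (by simp)]
        rfl
      rw [pvD_cons]
      refine congrArg some (Prod.ext rfl (Prod.ext ?_ ?_))
      · simp
      · show ((a :: ((rest.filter fun p => p.1 == c).map (·.2)))
            :: (pvD (rest.filter fun p => !(p.1 == c))).map (pvApps (rest.filter fun p => !(p.1 == c))))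
          = (c :: pvD (rest.filter fun p => !(p.1 == c))).map (pvApps ((c, a) :: rest))
        rw [List.map_cons, happs_c]
        congr 1
        exact List.map_congr_left fun x hx => happs_ne x (hne x hx)

-- ===== VERDICT (by name: the statement is the Claim_ definition above) =====
theorem score_keywords_spec : Claim_equal_score_keywords := by
  intro mw ws cs as_ _ hpre
  obtain ⟨hlen, hgood⟩ := hpre
  have hz : ∀ p ∈ cs.zip as_, p.1 ∈ cs := fun p hp => (List.of_mem_zip (by exact hp)).1
  have hA : ∀ p ∈ cs.zip as_, pvAScore mw ws p.1 = some (pvScoreV mw ws p.1) :=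
    fun p hp => pvAScore_eq mw ws p.1 (hgood p.1 (hz p hp))
  have hG : ∀ p ∈ cs.zip as_, ∀ w ∈ p.1, w ∈ mw ∧ mw.idxOf w < ws.length :=
    fun p hp => hgood p.1 (hz p hp)
  show score_keywords mw ws cs as_ = score_keywords_alt mw ws cs as_
  unfold score_keywords score_keywords_alt
  rw [pvA_fold_eq_zip mw ws cs as_ hlen, pv_zip_fold_char mw ws _ hA,
    pvBGo_char mw ws (cs.zip as_).length _ le_rfl hG]
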